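-- pv_equiv track=rewrite | github.com/yenhao/text-level-gnn | train_text-level_gnn.py | get_word_neighbor
-- ===== SOURCE A (Python) =====
-- skip_size = 2 # from paper
--
-- def get_word_neighbor(text_tokens, skip=skip_size):
--     text_len = len(text_tokens)
--
--     edge_neighbors = []
--     for w_idx in range(text_len):
--         skip_neighbors = []
--         # check before
--         for sk_i in range(skip):
--             before_idx = w_idx -1 - sk_i
--             skip_neighbors.append(text_tokens[before_idx] if before_idx > -1 else 0)
--
--         # check after
--         for sk_i in range(skip):
--             after_idx = w_idx +1 +sk_i
--             skip_neighbors.append(text_tokens[after_idx] if after_idx < text_len else 0)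
--
--         edge_neighbors.append(skip_neighbors)
--     return edge_neighbors
-- ===== SOURCE B (Python) =====
-- skip_size = 2  # from paper
--
-- def get_word_neighbor(text_tokens, skip=skip_size):
--     k = max(skip, 0)
--     pad = [0] * k
--     padded = pad + list(text_tokens) + pad
--     return [padded[w:w + k][::-1] + padded[w + k + 1:w + 2 * k + 1]
--             for w in range(len(text_tokens))]
-- ===== Notes on version B (the rewrite author's own statement) =====
-- stated objective: simpler
-- what changed: replaces the two bounds-checked inner loops with one zero-padded buffer built once, from which each word's neighbor list is obtained by two slices (the before-slice reversed)
import Mathlib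
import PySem

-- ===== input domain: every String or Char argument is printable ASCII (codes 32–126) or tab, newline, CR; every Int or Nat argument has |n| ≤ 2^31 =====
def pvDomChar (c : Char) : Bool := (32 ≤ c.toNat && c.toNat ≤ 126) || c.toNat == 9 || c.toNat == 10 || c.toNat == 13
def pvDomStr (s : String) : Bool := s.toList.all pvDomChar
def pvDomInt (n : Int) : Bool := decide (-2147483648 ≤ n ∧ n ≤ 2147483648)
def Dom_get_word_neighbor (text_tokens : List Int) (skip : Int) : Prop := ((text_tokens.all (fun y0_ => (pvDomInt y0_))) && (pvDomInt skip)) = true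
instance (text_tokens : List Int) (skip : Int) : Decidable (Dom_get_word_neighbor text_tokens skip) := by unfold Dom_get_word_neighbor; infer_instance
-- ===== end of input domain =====

-- B builds one zero-padded buffer and takes each word's neighbors as two slices (before-slice
-- reversed), replacing A's two bounds-checked inner loops; objective: simpler, same cost.

-- ===== PORT A =====
def get_word_neighbor (text_tokens : List Int) (skip : Int) : List (List Int) :=
  let text_len : Int := text_tokens.length
  (PySem.List.pyRange 0 text_len 1).foldl (fun edge_neighbors w_idx =>
    -- check before
    let skip_neighbors : List Int :=
      (PySem.List.pyRange 0 skip 1).foldl (fun acc sk_i =>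
        let before_idx := w_idx - 1 - sk_i
        acc ++ [if before_idx > -1 then PySem.List.pyGetD text_tokens before_idx 0 else 0]) []
    -- check after
    let skip_neighbors : List Int :=
      (PySem.List.pyRange 0 skip 1).foldl (fun acc sk_i =>
        let after_idx := w_idx + 1 + sk_i
        acc ++ [if after_idx < text_len then PySem.List.pyGetD text_tokens after_idx 0 else 0]) skip_neighbors
    edge_neighbors ++ [skip_neighbors]) []

-- ===== PORT B =====
def get_word_neighbor_alt (text_tokens : List Int) (skip : Int) : List (List Int) :=
  let k : Int := max skip 0
  let pad : List Int := List.replicate k.toNat 0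
  let padded : List Int := pad ++ text_tokens ++ pad
  (PySem.List.pyRange 0 (text_tokens.length : Int) 1).map (fun w =>
    (PySem.List.slice padded (some w) (some (w + k))).reverse ++
      PySem.List.slice padded (some (w + k + 1)) (some (w + 2 * k + 1)))

-- ===== PRECONDITION & SPEC =====
def Spec_get_word_neighbor (text_tokens : List Int) (skip : Int) (out : List (List Int)) : Prop := out = get_word_neighbor_alt text_tokens skip
instance (text_tokens : List Int) (skip : Int) (out : List (List Int)) : Decidable (Spec_get_word_neighbor text_tokens skip out) := by unfold Spec_get_word_neighbor; infer_instance

-- ===== CLAIM (what is proved, stated in full; the proofs are below) =====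
def Claim_equal_get_word_neighbor : Prop := ∀ (text_tokens : List Int) (skip : Int), Dom_get_word_neighbor text_tokens skip → Spec_get_word_neighbor text_tokens skip (get_word_neighbor text_tokens skip)

-- ===== LEMMAS AND PROOFS =====

-- range(0, skip) as a map over a Nat range
theorem pv_pyRange_skip (skip : Int) :
    PySem.List.pyRange 0 skip 1 = (List.range skip.toNat).map (fun (i : Nat) => (i : Int)) := by
  rw [PySem.List.pyRange_one]
  simp

-- element m of the padded buffer (any in-range m), as a guarded lookup into tt
theorem pv_padded_getD (tt : List Int) (s m : Nat) :
    (List.replicate s (0:Int) ++ tt ++ List.replicate s 0).getD m 0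
      = (if s ≤ m then tt.getD (m - s) 0 else 0) := by
  rcases lt_or_ge m (s + tt.length) with h | h
  · rw [List.getD_append _ _ _ _ (by simp; omega)]
    rcases lt_or_ge m s with h1 | h1
    · rw [if_neg (by omega), List.getD_append _ _ _ _ (by simpa using h1)]
      simp
    · rw [if_pos h1, List.getD_append_right _ _ _ _ (by simpa using h1)]
      simp
  · rw [List.getD_append_right _ _ _ _ (by simp; omega), if_pos (by omega)]
    rw [List.getD_eq_default tt 0 (by omega)]
    simp [List.getD_eq_getElem?_getD]

-- a fully in-range drop/take window is a map of getD over a range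
theorem pv_window_eq_map (xs : List Int) (j s : Nat) (h : j + s ≤ xs.length) :
    (xs.drop j).take s = (List.range s).map (fun i => xs.getD (j + i) 0) := by
  apply List.ext_getElem
  · simp; omega
  · intro i h1 h2
    simp only [List.getElem_take, List.getElem_drop, List.getElem_map, List.getElem_range]
    rw [List.getD_eq_getElem?_getD, List.getElem?_eq_getElem (by simp at h1 ⊢; omega)]
    rfl

-- the before-window, reversed, is A's before loop
theorem pv_key_before (tt : List Int) (s j : Nat) (hj : j < tt.length) :
    ((PySem.List.slice (List.replicate s (0:Int) ++ tt ++ List.replicate s 0)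
        (some (j:Int)) (some ((j:Int) + (s:Int)))).reverse)
      = (List.range s).map (fun (i : Nat) =>
          if (j:Int) - 1 - (i:Int) > -1 then PySem.List.pyGetD tt ((j:Int) - 1 - (i:Int)) 0 else 0) := by
  rw [PySem.List.slice_natCast_add]
  rw [pv_window_eq_map _ j s (by simp; omega)]
  apply List.ext_getElem
  · simp
  · intro i h1 h2
    have hi : i < s := by simpa using h2
    simp only [List.getElem_reverse, List.length_map, List.length_range, List.getElem_map,
      List.getElem_range]
    rw [pv_padded_getD]
    rcases lt_or_ge i j with hij | hij
    · rw [if_pos (by omega), if_pos (by omega)]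
      rw [show ((j:Int) - 1 - (i:Int)) = ((j - 1 - i : Nat) : Int) by omega,
        PySem.List.pyGetD_natCast]
      congr 1
      omega
    · rw [if_neg (by omega), if_neg (by omega)]

-- the after-window is A's after loop
theorem pv_key_after (tt : List Int) (s j : Nat) (hj : j < tt.length) :
    PySem.List.slice (List.replicate s (0:Int) ++ tt ++ List.replicate s 0)
        (some ((j:Int) + (s:Int) + 1)) (some ((j:Int) + 2 * (s:Int) + 1))
      = (List.range s).map (fun (i : Nat) =>
          if (j:Int) + 1 + (i:Int) < (tt.length:Int) then PySem.List.pyGetD tt ((j:Int) + 1 + (i:Int)) 0 else 0) := by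
  rw [show ((j:Int) + (s:Int) + 1) = ((j + s + 1 : Nat) : Int) by push_cast; ring,
    show ((j:Int) + 2 * (s:Int) + 1) = ((j + s + 1 : Nat) : Int) + (s:Int) by push_cast; ring]
  rw [PySem.List.slice_natCast_add]
  rw [pv_window_eq_map _ (j + s + 1) s (by simp; omega)]
  apply List.map_congr_left
  intro i hi
  rw [List.mem_range] at hi
  rw [pv_padded_getD, if_pos (by omega)]
  rcases lt_or_ge (j + 1 + i) tt.length with h2 | h2
  · rw [if_pos (by exact_mod_cast (by omega : ((j + 1 + i : Nat) : Int) < (tt.length : Int)))]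
    rw [show ((j:Int) + 1 + (i:Int)) = ((j + 1 + i : Nat) : Int) by push_cast; ring,
      PySem.List.pyGetD_natCast]
    congr 1
    omega
  · rw [if_neg (by omega)]
    rw [List.getD_eq_getElem?_getD]
    rw [List.getElem?_eq_none (by omega)]
    rfl

-- ===== VERDICT (by name: the statement is the Claim_ definition above) =====
theorem get_word_neighbor_spec : Claim_equal_get_word_neighbor := by
  intro tt skip _
  unfold Spec_get_word_neighbor get_word_neighbor get_word_neighbor_alt
  simp only [PySem.List.foldl_append_singleton_eq_map, List.nil_append]
  have hmax : max skip 0 = ((skip.toNat : Nat) : Int) := (Int.ofNat_toNat skip).symm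
  rw [hmax]
  apply List.map_congr_left
  intro w hw
  rw [PySem.List.mem_pyRange_one] at hw
  obtain ⟨j, rfl⟩ : ∃ j : Nat, w = (j : Int) := ⟨w.toNat, (Int.toNat_of_nonneg hw.1).symm⟩
  have hj : j < tt.length := by exact_mod_cast hw.2
  set s := skip.toNat with hs
  rw [pv_pyRange_skip, List.map_map, List.map_map]
  simp only [Int.toNat_natCast, Function.comp_def]
  rw [pv_key_before tt s j hj, pv_key_after tt s j hj]
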